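-- pv_equiv track=rewrite | github.com/victorwss/exemplo-telegram | reset_bot.py | parse
-- ===== SOURCE A (Python) =====
-- from typing import Any, Dict, List, Optional
--
-- def parse(texto: str) -> List[str]:
--     lista: List[str] = []
--     proximo: str = ""
--     for c in texto:
--         if c >= '0' and c <= '9':
--             proximo += c
--         elif c in ['.', '-', '/']:
--             pass
--         else:
--             if len(proximo) > 2:
--                 lista.append(proximo)
--             proximo = ""
--     if len(proximo) > 2:
--         lista.append(proximo)
--     return lista
-- ===== SOURCE B (Python) =====
-- def parse(texto):
--     # Strip all separator characters first (they are transparent in a run),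
--     # then extract maximal ASCII-digit runs and keep those longer than 2 chars.
--     cleaned = texto.replace('.', '').replace('-', '').replace('/', '')
--     runs = []
--     i = 0
--     n = len(cleaned)
--     while i < n:
--         if '0' <= cleaned[i] <= '9':
--             j = i
--             while j < n and '0' <= cleaned[j] <= '9':
--                 j += 1
--             runs.append(cleaned[i:j])
--             i = j
--         else:
--             i += 1
--     return [r for r in runs if len(r) > 2]
-- ===== Notes on version B (the rewrite author's own statement) =====
-- stated objective: simpler
-- what changed: Replaces the character-by-character state machine carrying a pending run across separators by strip-separators-first, then extract maximal digit runs by slicing and filter runs longer than 2.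
import Mathlib
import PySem

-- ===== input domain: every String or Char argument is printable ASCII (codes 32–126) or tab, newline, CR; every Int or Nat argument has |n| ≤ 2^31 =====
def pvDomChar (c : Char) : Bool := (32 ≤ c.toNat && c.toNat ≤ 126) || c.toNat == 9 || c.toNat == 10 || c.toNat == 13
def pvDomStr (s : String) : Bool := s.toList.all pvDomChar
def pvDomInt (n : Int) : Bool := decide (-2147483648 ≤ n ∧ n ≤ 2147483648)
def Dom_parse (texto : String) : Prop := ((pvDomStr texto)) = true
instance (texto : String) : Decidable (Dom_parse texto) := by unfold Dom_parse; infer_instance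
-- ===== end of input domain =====

-- B strips the separator characters first and then extracts maximal digit runs by
-- slicing, instead of A's one-pass state machine; objective: simpler, same cost.


-- ===== PORT A =====
-- A's loop: state (lista, proximo); digits extend proximo, separators are skipped,
-- any other char flushes proximo (if longer than 2) and resets it.
def parseStep (st : List String × List Char) (c : Char) : List String × List Char :=
  if '0' ≤ c ∧ c ≤ '9' then (st.1, st.2 ++ [c])
  else if c = '.' ∨ c = '-' ∨ c = '/' then st
  else (if st.2.length > 2 then st.1 ++ [String.mk st.2] else st.1, [])

def parse (texto : String) : List String :=
  let st := texto.toList.foldl parseStep ([], [])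
  if st.2.length > 2 then st.1 ++ [String.mk st.2] else st.1

-- ===== PORT B =====
def isDig09 (c : Char) : Bool := '0' ≤ c && c ≤ '9'

-- maximal digit runs of a character list (the port of Source B's inner while-loop scan:
-- at a digit, slice out the whole run and continue after it)
def findRuns : List Char → List (List Char)
  | [] => []
  | c :: rest =>
      if isDig09 c then (c :: rest.takeWhile isDig09) :: findRuns (rest.dropWhile isDig09)
      else findRuns rest
termination_by l => l.length
decreasing_by
  · simpa using Nat.lt_succ_of_le (rest.length_dropWhile_le isDig09)
  · simp

def parse_alt (texto : String) : List String :=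
  let cleaned := texto.toList.filter (fun c => !(c == '.' || c == '-' || c == '/'))
  ((findRuns cleaned).filter (fun r => r.length > 2)).map (fun r => String.mk r)

-- ===== PRECONDITION & SPEC =====
def Spec_parse (texto : String) (out : List String) : Prop := out = parse_alt texto
instance (texto : String) (out : List String) : Decidable (Spec_parse texto out) := by unfold Spec_parse; infer_instance

-- ===== CLAIM (what is proved, stated in full; the proofs are below) =====
def Claim_equal_parse : Prop := ∀ (texto : String), Dom_parse texto → Spec_parse texto (parse texto)

-- ===== LEMMAS AND PROOFS =====

-- runs of cs with a pending prefix p already accumulated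
def findRunsP (p : List Char) : List Char → List (List Char)
  | [] => if p.isEmpty then [] else [p]
  | c :: rest =>
      if isDig09 c then findRunsP (p ++ [c]) rest
      else (if p.isEmpty then [] else [p]) ++ findRuns rest

theorem findRunsP_ne (cs : List Char) : ∀ p : List Char, p ≠ [] →
    findRunsP p cs = (p ++ cs.takeWhile isDig09) :: findRuns (cs.dropWhile isDig09) := by
  induction cs with
  | nil => intro p hp; simp [findRunsP, hp, findRuns]
  | cons c rest ih =>
      intro p hp
      by_cases hc : isDig09 c = true
      · rw [findRunsP, if_pos hc, ih (p ++ [c]) (by simp)]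
        simp [List.takeWhile, List.dropWhile, hc]
      · rw [findRunsP, if_neg hc]
        simp [List.takeWhile, List.dropWhile, hc, hp, findRuns]

theorem findRunsP_nil (cs : List Char) : findRunsP [] cs = findRuns cs := by
  cases cs with
  | nil => simp [findRunsP, findRuns]
  | cons c rest =>
      by_cases hc : isDig09 c = true
      · rw [findRunsP, if_pos hc]
        simp only [List.nil_append]
        rw [findRunsP_ne rest [c] (by simp), findRuns, if_pos hc]
        simp
      · rw [findRunsP, if_neg hc, findRuns, if_neg hc]; simp

theorem digit_not_sep {c : Char} (h : '0' ≤ c ∧ c ≤ '9') : ¬(c = '.' ∨ c = '-' ∨ c = '/') := by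
  rintro (rfl | rfl | rfl) <;> exact absurd h (by decide)

theorem parse_main (cs : List Char) : ∀ (l : List String) (p : List Char),
    (let st := cs.foldl parseStep (l, p);
      if st.2.length > 2 then st.1 ++ [String.mk st.2] else st.1) =
    l ++ ((findRunsP p (cs.filter (fun c => !(c == '.' || c == '-' || c == '/')))).filter
            (fun r => r.length > 2)).map (fun r => String.mk r) := by
  induction cs with
  | nil =>
      intro l p
      by_cases hp : p = []
      · subst hp; simp [findRunsP]
      · simp only [List.filter_nil, findRunsP, List.isEmpty_eq_false_iff.mpr hp, if_neg]
        by_cases hl : p.length > 2 <;> simp [hl]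
  | cons c rest ih =>
      intro l p
      by_cases hd : '0' ≤ c ∧ c ≤ '9'
      · have hdig : isDig09 c = true := by simp [isDig09, hd.1, hd.2]
        have hns : (!(c == '.' || c == '-' || c == '/')) = true := by
          have := digit_not_sep hd
          simp only [Bool.not_eq_eq_eq_not, Bool.not_true, Bool.or_eq_false_iff,
            beq_eq_false_iff_ne]
          tauto
        rw [List.foldl_cons]
        simp only [parseStep, if_pos hd]
        rw [ih l (p ++ [c])]
        simp only [List.filter_cons, hns, if_true]
        rw [findRunsP, if_pos hdig]
      · by_cases hs : c = '.' ∨ c = '-' ∨ c = '/'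
        · have hns : (!(c == '.' || c == '-' || c == '/')) = false := by
            rcases hs with rfl | rfl | rfl <;> decide
          rw [List.foldl_cons]
          simp only [parseStep, if_neg hd, if_pos hs]
          rw [ih l p]
          simp only [List.filter_cons, hns, Bool.false_eq_true, if_false]
        · have hdig : isDig09 c = false := by
            simp only [isDig09, Bool.and_eq_false_iff, decide_eq_false_iff_not]
            tauto
          have hns : (!(c == '.' || c == '-' || c == '/')) = true := by
            simp only [Bool.not_eq_eq_eq_not, Bool.not_true, Bool.or_eq_false_iff,
              beq_eq_false_iff_ne]
            tauto
          rw [List.foldl_cons]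
          simp only [parseStep, if_neg hd, if_neg hs]
          rw [ih _ []]
          simp only [List.filter_cons, hns, if_true]
          simp only [findRunsP, hdig, Bool.false_eq_true, if_false, findRunsP_nil]
          by_cases hp : p = []
          · subst hp
            simp only [List.isEmpty_nil, if_true, List.nil_append, List.length_nil]
            norm_num
          · simp only [List.isEmpty_eq_false_iff.mpr hp, Bool.false_eq_true, if_false,
              List.filter_append, List.map_append]
            by_cases hl : p.length > 2
            · rw [if_pos hl]
              simp only [List.filter_cons, List.filter_nil, decide_eq_true_eq, hl, if_true,
                List.map_cons, List.map_nil, List.append_assoc]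
            · rw [if_neg hl]
              simp only [List.filter_cons, List.filter_nil, decide_eq_true_eq, hl, if_false,
                List.map_nil, List.nil_append]

-- ===== VERDICT (by name: the statement is the Claim_ definition above) =====
theorem parse_spec : Claim_equal_parse := by
  intro texto _
  unfold Spec_parse parse parse_alt
  rw [parse_main texto.toList [] [], findRunsP_nil]
  simp
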